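-- pv_equiv track=rewrite | github.com/Zyrotot/grafos | A2/q1.py | buscaAntecessor
-- ===== SOURCE A (Python) =====
-- def buscaAntecessor(vertice, antecessores):
--     con = set()
--     for antecessor in antecessores:
--         if vertice == antecessores[antecessor]:
--             con.add(vertice)
--             con.add(antecessor)
--             con = con.union(buscaAntecessor(antecessor, antecessores))
--
--     return con
-- ===== SOURCE B (Python) =====
-- def buscaAntecessor(vertice, antecessores):
--     rev = {}
--     for antecessor in antecessores:
--         rev.setdefault(antecessores[antecessor], []).append(antecessor)
--     if vertice not in rev:
--         return set()
--     def coleta(x):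
--         out = [x]
--         for filho in rev.get(x, []):
--             out.extend(coleta(filho))
--         return out
--     return set(coleta(vertice))
-- ===== Notes on version B (the rewrite author's own statement) =====
-- stated objective: alternative
-- what changed: B precomputes a reverse-adjacency index (predecessor lists) in one pass and collects the ancestors of vertice with a single DFS over that index, instead of A's rescanning the whole map and rebuilding set unions at every recursive call.
import Mathlib
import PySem

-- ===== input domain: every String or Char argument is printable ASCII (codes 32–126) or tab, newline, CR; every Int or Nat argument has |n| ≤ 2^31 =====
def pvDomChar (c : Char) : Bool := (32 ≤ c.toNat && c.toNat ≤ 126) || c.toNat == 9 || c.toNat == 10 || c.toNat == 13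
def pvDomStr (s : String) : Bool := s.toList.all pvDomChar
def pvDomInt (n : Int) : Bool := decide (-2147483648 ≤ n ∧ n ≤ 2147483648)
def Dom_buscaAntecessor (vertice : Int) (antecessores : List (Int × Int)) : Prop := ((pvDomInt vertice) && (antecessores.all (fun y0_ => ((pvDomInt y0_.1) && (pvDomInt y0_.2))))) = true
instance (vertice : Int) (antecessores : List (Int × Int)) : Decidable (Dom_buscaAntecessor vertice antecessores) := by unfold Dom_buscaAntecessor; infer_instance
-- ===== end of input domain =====

-- B replaces A's full-map rescan per recursive call by a one-pass reverse-adjacency index plus a single DFS (objective: alternative).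

-- ===== PORT A =====
-- A recurses on the unchanged map; the Lean port carries a fuel argument (antecessores.length + 1,
-- enough for every acyclic chain) only to make the recursion total — on inputs satisfying
-- Pre_buscaAntecessor the fuel is never exhausted. The lookup antecessores[antecessor] is ported as
-- getD (the key is drawn from the dict, so Python's lookup cannot raise).
def buscaAntecessorGo (d : PySem.Dict Int Int) : Nat → Int → List Int
  | 0, _ => PySem.Set.empty
  | n+1, vertice =>
      d.keys.foldl (fun con antecessor =>
        if vertice == d.getD antecessor 0 then
          PySem.Set.union (PySem.Set.add (PySem.Set.add con vertice) antecessor)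
            (buscaAntecessorGo d n antecessor)
        else con) PySem.Set.empty

def buscaAntecessor (vertice : Int) (antecessores : List (Int × Int)) : List Int :=
  buscaAntecessorGo (PySem.Dict.ofList antecessores) (antecessores.length + 1) vertice

-- ===== PORT B =====
-- literal port of Source B's coleta (fueled like A's recursion; fuel length+2 suffices on Pre_ inputs)
def coletaGo (rev : PySem.Dict Int (List Int)) : Nat → Int → List Int
  | 0, _ => []
  | n+1, x => (rev.getD x []).foldl (fun out filho => out ++ coletaGo rev n filho) [x]

def buscaAntecessor_alt (vertice : Int) (antecessores : List (Int × Int)) : List Int :=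
  let d := PySem.Dict.ofList antecessores
  let rev := d.keys.foldl (fun r antecessor =>
      r.modify (d.getD antecessor 0) [] (fun l => l ++ [antecessor])) PySem.Dict.empty
  if rev.contains vertice then PySem.Set.ofList (coletaGo rev (antecessores.length + 2) vertice)
  else PySem.Set.empty

-- ===== PRECONDITION & SPEC =====
-- pvChain d n x is the forward orbit x, d[x], d[d[x]], … (n steps) of the functional graph —
-- a reachability condition on the INPUT map, not a copy of either port: both programs walk the
-- REVERSE direction (predecessors). 'vertice ∈ its own forward orbit' says vertice lies on a cycle.
def pvChain (d : PySem.Dict Int Int) : Nat → Int → List Int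
  | 0, _ => []
  | n+1, x =>
      match d.get? x with
      | none => []
      | some y => y :: pvChain d n y

-- Pre_ excludes exactly the inputs whose vertice lies on a cycle of the map: there Python A recurses forever (RecursionError).
def Pre_buscaAntecessor (vertice : Int) (antecessores : List (Int × Int)) : Prop :=
  vertice ∉ pvChain (PySem.Dict.ofList antecessores) antecessores.length vertice

instance (vertice : Int) (antecessores : List (Int × Int)) : Decidable (Pre_buscaAntecessor vertice antecessores) := by
  unfold Pre_buscaAntecessor; infer_instance

def pvWitness_buscaAntecessor : Int × (List (Int × Int)) := (2, [(1, 2)])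

def Spec_buscaAntecessor (vertice : Int) (antecessores : List (Int × Int)) (out : List Int) : Prop := out = buscaAntecessor_alt vertice antecessores
instance (vertice : Int) (antecessores : List (Int × Int)) (out : List Int) : Decidable (Spec_buscaAntecessor vertice antecessores out) := by unfold Spec_buscaAntecessor; infer_instance

-- ===== CLAIM (what is proved, stated in full; the proofs are below) =====
def Claim_equal_buscaAntecessor : Prop := ∀ (vertice : Int) (antecessores : List (Int × Int)), Dom_buscaAntecessor vertice antecessores → Pre_buscaAntecessor vertice antecessores → Spec_buscaAntecessor vertice antecessores (buscaAntecessor vertice antecessores)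

-- ===== LEMMAS AND PROOFS =====

-- the predecessors of v, in key order
def predsOf (d : PySem.Dict Int Int) (v : Int) : List Int :=
  d.keys.filter (fun k => v == d.getD k 0)

-- full (fuel-truncated) expansion sequence generated by A's recursion
def Texp (d : PySem.Dict Int Int) : Nat → Int → List Int
  | 0, _ => []
  | n+1, v => (predsOf d v).flatMap (fun k => v :: k :: Texp d n k)

-- proof-side name for the reverse-adjacency dict B builds
def revD (a : List (Int × Int)) : PySem.Dict Int (List Int) :=
  (PySem.Dict.ofList a).keys.foldl (fun r antecessor =>
      r.modify ((PySem.Dict.ofList a).getD antecessor 0) [] (fun l => l ++ [antecessor]))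
    PySem.Dict.empty

theorem alt_unfold (vertice : Int) (antecessores : List (Int × Int)) :
    buscaAntecessor_alt vertice antecessores
    = if (revD antecessores).contains vertice then
        PySem.Set.ofList (coletaGo (revD antecessores) (antecessores.length + 2) vertice)
      else PySem.Set.empty := rfl

theorem update_snoc (s l : List Int) (x : Int) :
    PySem.Set.update s (l ++ [x]) = PySem.Set.add (PySem.Set.update s l) x := by
  simp [PySem.Set.update_append, PySem.Set.update_cons, PySem.Set.update_nil]

theorem update_ofList (t : List Int) (s : List Int) :
    PySem.Set.update s (PySem.Set.ofList t) = PySem.Set.update s t := by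
  induction t using List.reverseRecOn generalizing s with
  | nil => simp [PySem.Set.ofList]
  | append_singleton t x ih =>
      rw [PySem.Set.ofList_append_singleton, update_snoc]
      by_cases hx : x ∈ t
      · rw [PySem.Set.add_of_mem (by simpa [PySem.Set.mem_ofList] using hx)]
        rw [ih, PySem.Set.add_of_mem (by simp [PySem.Set.mem_update, hx])]
      · rw [PySem.Set.add_of_not_mem (by simpa [PySem.Set.mem_ofList] using hx), update_snoc, ih]

-- A's inner loop computes a Set.update by the block sequence
theorem buscaLoop_eq (d : PySem.Dict Int Int) (n : Nat) (v : Int) :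
    ∀ (ks : List Int) (con : List Int),
      ks.foldl (fun con antecessor =>
        if v == d.getD antecessor 0 then
          PySem.Set.union (PySem.Set.add (PySem.Set.add con v) antecessor)
            (buscaAntecessorGo d n antecessor)
        else con) con
      = PySem.Set.update con
          ((ks.filter (fun k => v == d.getD k 0)).flatMap
            (fun k => v :: k :: buscaAntecessorGo d n k)) := by
  intro ks
  induction ks with
  | nil => intro con; simp [PySem.Set.update_nil]
  | cons k ks ih =>
      intro con
      by_cases h : (v == d.getD k 0) = true
      · simp only [List.foldl_cons, List.filter_cons, h, if_pos, List.flatMap_cons]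
        rw [ih, PySem.Set.update_append]
        rfl
      · simp only [List.foldl_cons, List.filter_cons, h, if_neg, Bool.false_eq_true,
          not_false_iff]
        rw [ih]

theorem update_flatMap_ofList (d : PySem.Dict Int Int) (n : Nat) (v : Int)
    (g : Int → List Int) (hg : ∀ k, g k = PySem.Set.ofList (Texp d n k)) :
    ∀ (l : List Int) (s : List Int),
      PySem.Set.update s (l.flatMap (fun k => v :: k :: g k))
      = PySem.Set.update s (l.flatMap (fun k => v :: k :: Texp d n k)) := by
  intro l
  induction l with
  | nil => intro s; rfl
  | cons k l ih =>
      intro s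
      simp only [List.flatMap_cons]
      rw [PySem.Set.update_append, PySem.Set.update_append,
        PySem.Set.update_cons, PySem.Set.update_cons, PySem.Set.update_cons, PySem.Set.update_cons,
        hg k, update_ofList, ih]

theorem go_eq_ofList_Texp (d : PySem.Dict Int Int) :
    ∀ (n : Nat) (v : Int), buscaAntecessorGo d n v = PySem.Set.ofList (Texp d n v) := by
  intro n
  induction n with
  | zero => intro v; rfl
  | succ n ih =>
      intro v
      show _ = PySem.Set.ofList (Texp d (n+1) v)
      rw [buscaAntecessorGo, buscaLoop_eq]
      rw [show PySem.Set.ofList (Texp d (n+1) v) = PySem.Set.update PySem.Set.empty (Texp d (n+1) v) from rfl]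
      rw [Texp]
      exact update_flatMap_ofList d n v _ ih (predsOf d v) PySem.Set.empty

-- B's loop over children is init ++ flatMap
theorem foldl_append_coleta (rev : PySem.Dict Int (List Int)) (n : Nat) :
    ∀ (l : List Int) (init : List Int),
      l.foldl (fun out filho => out ++ coletaGo rev n filho) init = init ++ l.flatMap (coletaGo rev n) := by
  intro l
  induction l with
  | nil => intro init; simp
  | cons j l ih => intro init; simp [ih, List.append_assoc]

-- the reverse-adjacency dict built by B, characterized
theorem rev_getD (a : List (Int × Int)) (c : Int) :
    (revD a).getD c [] = predsOf (PySem.Dict.ofList a) c := by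
  unfold revD
  rw [← List.foldl_map (f := fun k => (((PySem.Dict.ofList a).getD k 0 : Int), k))
    (g := fun (r : PySem.Dict Int (List Int)) (p : Int × Int) => r.modify p.1 [] (fun l => l ++ [p.2]))]
  rw [PySem.Dict.getD_foldl_modify_append]
  simp only [PySem.Dict.getD_empty, List.nil_append, List.filter_map, List.map_map]
  rw [show ((fun p => p.1 == c) ∘ fun k => (((PySem.Dict.ofList a).getD k 0 : Int), k))
      = fun k => (PySem.Dict.ofList a).getD k 0 == c from rfl]
  rw [show ((fun (p : Int × Int) => p.2) ∘ fun k => (((PySem.Dict.ofList a).getD k 0 : Int), k)) = id from rfl,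
    List.map_id]
  unfold predsOf
  apply List.filter_congr
  intro k _
  simp [eq_comm]

theorem rev_contains (a : List (Int × Int)) (v : Int) :
    (revD a).contains v = true ↔ predsOf (PySem.Dict.ofList a) v ≠ [] := by
  unfold revD
  rw [PySem.Dict.contains_iff_mem_keys, PySem.Dict.keys_foldl_modify_key]
  rw [PySem.Dict.keys_empty]
  constructor
  · intro hv
    have : v ∈ (PySem.Dict.ofList a).keys.map (fun k => (PySem.Dict.ofList a).getD k 0) := by
      simpa [PySem.Set.mem_update] using hv
    obtain ⟨k, hk, hkv⟩ := List.mem_map.mp this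
    intro hnil
    have hmem : k ∈ predsOf (PySem.Dict.ofList a) v :=
      List.mem_filter.mpr ⟨hk, by rw [hkv]; exact beq_self_eq_true v⟩
    simp [hnil] at hmem
  · intro hne
    obtain ⟨k, hk⟩ := List.exists_mem_of_ne_nil _ hne
    rw [predsOf, List.mem_filter] at hk
    have : v ∈ (PySem.Dict.ofList a).keys.map (fun k => (PySem.Dict.ofList a).getD k 0) :=
      List.mem_map.mpr ⟨k, hk.1, (eq_of_beq hk.2).symm⟩
    simp [PySem.Set.mem_update, this]

-- coleta in terms of predsOf
theorem coleta_succ (a : List (Int × Int)) (n : Nat) (x : Int) :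
    coletaGo (revD a) (n+1) x
    = x :: (predsOf (PySem.Dict.ofList a) x).flatMap (coletaGo (revD a) n) := by
  rw [coletaGo, foldl_append_coleta, rev_getD]
  rfl

-- bridge, step over a block list (x already collected)
theorem bridge_blocks (a : List (Int × Int)) (n : Nat)
    (h : ∀ (x : Int) (s : List Int),
      PySem.Set.update s (x :: Texp (PySem.Dict.ofList a) n x)
      = PySem.Set.update s (coletaGo (revD a) (n+1) x)) :
    ∀ (l : List Int) (x : Int) (s : List Int), x ∈ s →
      PySem.Set.update s (l.flatMap (fun k => x :: k :: Texp (PySem.Dict.ofList a) n k))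
      = PySem.Set.update s (l.flatMap (coletaGo (revD a) (n+1))) := by
  intro l
  induction l with
  | nil => intro x s _; rfl
  | cons k l ih =>
      intro x s hx
      simp only [List.flatMap_cons]
      rw [PySem.Set.update_append, PySem.Set.update_append]
      rw [PySem.Set.update_cons, PySem.Set.add_of_mem hx, h k s]
      rw [ih x _ (by simp [PySem.Set.mem_update, hx])]

-- the main bridge: a block headed by x equals B's collection of x
theorem bridge (a : List (Int × Int)) :
    ∀ (n : Nat) (x : Int) (s : List Int),
      PySem.Set.update s (x :: Texp (PySem.Dict.ofList a) n x)
      = PySem.Set.update s (coletaGo (revD a) (n+1) x) := by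
  intro n
  induction n with
  | zero =>
      intro x s
      rw [coleta_succ]
      have hz : (predsOf (PySem.Dict.ofList a) x).flatMap (coletaGo (revD a) 0) = [] := by
        simp [coletaGo]
      rw [hz]
      rfl
  | succ n ih =>
      intro x s
      rw [coleta_succ]
      show PySem.Set.update s (x :: Texp (PySem.Dict.ofList a) (n+1) x) = _
      rw [Texp, PySem.Set.update_cons, PySem.Set.update_cons]
      rw [bridge_blocks a n ih (predsOf (PySem.Dict.ofList a) x) x _ (by simp [PySem.Set.mem_add])]

theorem add_empty (v : Int) : PySem.Set.add PySem.Set.empty v = [v] := rfl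

theorem main_eq (v : Int) (a : List (Int × Int)) :
    buscaAntecessor v a = buscaAntecessor_alt v a := by
  rw [alt_unfold]
  unfold buscaAntecessor
  rw [go_eq_ofList_Texp]
  by_cases h : predsOf (PySem.Dict.ofList a) v = []
  · have hc : (revD a).contains v = false := by
      rw [← Bool.not_eq_true]
      intro hcontra
      exact ((rev_contains a v).mp hcontra) h
    rw [hc, Texp, h]
    simp
  · rcases List.exists_cons_of_ne_nil h with ⟨k0, l, hkl⟩
    have hc : (revD a).contains v = true := (rev_contains a v).mpr h
    rw [hc, if_pos rfl]
    rw [show (PySem.Set.ofList (Texp (PySem.Dict.ofList a) (a.length + 1) v) : List Int)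
        = PySem.Set.update PySem.Set.empty (Texp (PySem.Dict.ofList a) (a.length + 1) v) from rfl]
    rw [show (PySem.Set.ofList (coletaGo (revD a) (a.length + 2) v) : List Int)
        = PySem.Set.update PySem.Set.empty (coletaGo (revD a) (a.length + 2) v) from rfl]
    rw [Texp, hkl, coleta_succ, hkl]
    simp only [List.flatMap_cons]
    rw [PySem.Set.update_append]
    have h1 : PySem.Set.update PySem.Set.empty (v :: k0 :: Texp (PySem.Dict.ofList a) a.length k0)
        = PySem.Set.update [v] (k0 :: Texp (PySem.Dict.ofList a) a.length k0) := by
      rw [PySem.Set.update_cons, add_empty]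
    rw [h1, bridge a a.length k0 [v]]
    rw [bridge_blocks a a.length (bridge a a.length) l v _
      (by simp [PySem.Set.mem_update])]
    rw [← PySem.Set.update_append]
    rw [PySem.Set.update_cons, add_empty]

-- ===== VERDICT (by name: the statement is the Claim_ definition above) =====
theorem buscaAntecessor_spec : Claim_equal_buscaAntecessor := by
  intro v a _ _
  unfold Spec_buscaAntecessor
  exact main_eq v a
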